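-- pv_equiv track=rewrite | github.com/GAURAV0440/AI-DDR-Report-Generator | test.py | map_images_to_areas
-- ===== SOURCE A (Python) =====
-- def map_images_to_areas(inspection_images):
--     area_map = {
--         "Hall": [],
--         "Bedroom": [],
--         "Master Bedroom": [],
--         "Kitchen": [],
--         "Bathroom": [],
--         "Parking": [],
--         "External Wall": []
--     }
--
--     for img in inspection_images:
--         name = img.lower()
--
--         if "page3" in name:
--             area_map["Hall"].append(img)
--
--         elif "page4" in name:
--             area_map["Bedroom"].append(img)
--
--         elif "page5" in name:
--             area_map["Master Bedroom"].append(img)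
--
--         elif "page6" in name:
--             area_map["Bathroom"].append(img)
--
--         elif "page7" in name:
--             area_map["Kitchen"].append(img)
--
--         elif "page8" in name:
--             area_map["External Wall"].append(img)
--
--         elif "page9" in name:
--             area_map["Parking"].append(img)
--
--     return area_map
-- ===== SOURCE B (Python) =====
-- _PAGE_AREAS = [
--     ("page3", "Hall"),
--     ("page4", "Bedroom"),
--     ("page5", "Master Bedroom"),
--     ("page6", "Bathroom"),
--     ("page7", "Kitchen"),
--     ("page8", "External Wall"),
--     ("page9", "Parking"),
-- ]
--
-- _AREAS = ["Hall", "Bedroom", "Master Bedroom", "Kitchen",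
--           "Bathroom", "Parking", "External Wall"]
--
--
-- def _area_of(img):
--     name = img.lower()
--     return next((area for key, area in _PAGE_AREAS if key in name), None)
--
--
-- def map_images_to_areas(inspection_images):
--     # area-major: one filtering pass per area over pre-classified images
--     return {area: [img for img in inspection_images if _area_of(img) == area]
--             for area in _AREAS}
-- ===== Notes on version B (the rewrite author's own statement) =====
-- stated objective: alternative
-- what changed: Replaces A's single mutating pass with an if/elif chain by an area-major construction: a pure classifier maps each image to its area (first matching page substring or None), and the result dict is built by one filtering pass per area over the image list, with no mutation.
import Mathlib
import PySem

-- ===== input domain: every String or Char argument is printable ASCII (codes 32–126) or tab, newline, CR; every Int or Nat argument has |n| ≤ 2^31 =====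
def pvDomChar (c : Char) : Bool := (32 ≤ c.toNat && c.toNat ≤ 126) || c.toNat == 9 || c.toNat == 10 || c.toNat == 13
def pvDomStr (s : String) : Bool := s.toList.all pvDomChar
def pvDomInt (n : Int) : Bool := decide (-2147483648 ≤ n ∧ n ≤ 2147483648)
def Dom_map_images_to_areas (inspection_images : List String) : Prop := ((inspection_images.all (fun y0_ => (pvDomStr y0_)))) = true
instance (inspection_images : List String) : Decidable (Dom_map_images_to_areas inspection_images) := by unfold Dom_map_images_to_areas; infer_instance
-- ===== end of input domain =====

-- B rebuilds the result area-major (a pure classifier + one filtering pass per area,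
-- no mutation) instead of A's single mutating pass with an if/elif chain (objective: alternative).

-- ===== PORT A =====
-- the literal dict of A, built in its key order
def pvInitA : PySem.Dict String (List String) :=
  ((((((PySem.Dict.empty.insert "Hall" []).insert "Bedroom" []).insert "Master Bedroom" []).insert
      "Kitchen" []).insert "Bathroom" []).insert "Parking" []).insert "External Wall" []

-- one iteration of A's for-loop: the if/elif chain
def pvStepA (d : PySem.Dict String (List String)) (img : String) :
    PySem.Dict String (List String) :=
  let name := PySem.Str.lower img
  if PySem.Str.isIn "page3" name then d.modify "Hall" [] (· ++ [img])
  else if PySem.Str.isIn "page4" name then d.modify "Bedroom" [] (· ++ [img])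
  else if PySem.Str.isIn "page5" name then d.modify "Master Bedroom" [] (· ++ [img])
  else if PySem.Str.isIn "page6" name then d.modify "Bathroom" [] (· ++ [img])
  else if PySem.Str.isIn "page7" name then d.modify "Kitchen" [] (· ++ [img])
  else if PySem.Str.isIn "page8" name then d.modify "External Wall" [] (· ++ [img])
  else if PySem.Str.isIn "page9" name then d.modify "Parking" [] (· ++ [img])
  else d

def map_images_to_areas (inspection_images : List String) : List (String × List String) :=
  (inspection_images.foldl pvStepA pvInitA).items

-- ===== PORT B =====
def pvPageAreas : List (String × String) :=
  [("page3", "Hall"), ("page4", "Bedroom"), ("page5", "Master Bedroom"),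
   ("page6", "Bathroom"), ("page7", "Kitchen"), ("page8", "External Wall"),
   ("page9", "Parking")]

def pvAreas : List String :=
  ["Hall", "Bedroom", "Master Bedroom", "Kitchen", "Bathroom", "Parking", "External Wall"]

-- _area_of: 'next((area for key, area in _PAGE_AREAS if key in name), None)'
def pvAreaOf (img : String) : Option String :=
  let name := PySem.Str.lower img
  (pvPageAreas.find? (fun p => PySem.Str.isIn p.1 name)).map (·.2)

-- the dict comprehension: one filtering pass per area
def map_images_to_areas_alt (inspection_images : List String) : List (String × List String) :=
  pvAreas.map (fun area =>
    (area, inspection_images.filter (fun img => pvAreaOf img == some area)))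

-- ===== PRECONDITION & SPEC =====
def Spec_map_images_to_areas (inspection_images : List String) (out : List (String × List String)) : Prop := out = map_images_to_areas_alt inspection_images
instance (inspection_images : List String) (out : List (String × List String)) : Decidable (Spec_map_images_to_areas inspection_images out) := by unfold Spec_map_images_to_areas; infer_instance

-- ===== CLAIM (what is proved, stated in full; the proofs are below) =====
def Claim_equal_map_images_to_areas : Prop := ∀ (inspection_images : List String), Dom_map_images_to_areas inspection_images → Spec_map_images_to_areas inspection_images (map_images_to_areas inspection_images)

-- ===== LEMMAS AND PROOFS =====
-- A's if/elif chain is exactly: modify at the classified area (or skip)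
theorem pvStepA_classify (d : PySem.Dict String (List String)) (img : String) :
    pvStepA d img =
      match pvAreaOf img with
      | some a => d.modify a [] (· ++ [img])
      | none => d := by
  simp only [pvStepA, pvAreaOf, pvPageAreas, List.find?]
  split_ifs <;> simp_all

-- A's fold is the group-by fold over the classified pairs (area, img)
theorem pvFoldA_eq (xs : List String) (d : PySem.Dict String (List String)) :
    xs.foldl pvStepA d =
      (xs.filterMap (fun img => (pvAreaOf img).map (fun a => (a, img)))).foldl
        (fun d p => d.modify p.1 [] (· ++ [p.2])) d := by
  induction xs generalizing d with
  | nil => rfl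
  | cons x xs ih =>
    simp only [List.foldl_cons, List.filterMap_cons, pvStepA_classify]
    cases h : pvAreaOf x <;> simp [ih]

theorem pvFilter_pairs (xs : List String) (a : String) :
    ((xs.filterMap (fun img => (pvAreaOf img).map (fun b => (b, img)))).filter
        (fun p => p.1 == a)).map (·.2)
      = xs.filter (fun img => pvAreaOf img == some a) := by
  induction xs with
  | nil => rfl
  | cons x xs ih =>
    simp only [List.filterMap_cons]
    cases h : pvAreaOf x with
    | none => simpa [h] using ih
    | some b =>
      by_cases hb : b = a <;> simp [h, hb, ih]

-- every classified area is one of the seven keys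
theorem pvAreaOf_mem (img : String) (a : String) (h : pvAreaOf img = some a) :
    a ∈ pvAreas := by
  simp only [pvAreaOf, pvPageAreas, List.find?] at h
  repeat' split at h
  all_goals simp only [Option.map_some, Option.map_none, Option.some.injEq,
    reduceCtorEq] at h
  all_goals (subst h; decide)

-- keys are preserved through the fold (every classified area is already a key)
theorem pvKeys_step (d : PySem.Dict String (List String)) (img : String)
    (h : d.keys = pvAreas) : (pvStepA d img).keys = pvAreas := by
  rw [pvStepA_classify]
  cases ha : pvAreaOf img with
  | none => exact h
  | some a =>
    have hm : a ∈ pvAreas := pvAreaOf_mem img a ha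
    have hc : d.contains a = true := by
      rw [PySem.Dict.contains_eq_decide_mem_keys, h]; simpa using hm
    simp [PySem.Dict.keys_modify, PySem.Dict.keys_insert_of_contains, hc, h]

theorem pvKeys_fold (xs : List String) :
    (xs.foldl pvStepA pvInitA).keys = pvAreas := by
  have : ∀ d, d.keys = pvAreas → (xs.foldl pvStepA d).keys = pvAreas := by
    induction xs with
    | nil => exact fun d h => h
    | cons x xs ih => exact fun d h => ih _ (pvKeys_step d x h)
  exact this pvInitA (by decide)

-- each area's final value is B's filter
theorem pvGetD_fold (xs : List String) (a : String) (ha : a ∈ pvAreas) :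
    (xs.foldl pvStepA pvInitA).getD a [] = xs.filter (fun img => pvAreaOf img == some a) := by
  rw [pvFoldA_eq, PySem.Dict.getD_foldl_modify_append, pvFilter_pairs]
  fin_cases ha <;> rfl

-- ===== VERDICT (by name: the statement is the Claim_ definition above) =====
theorem map_images_to_areas_spec : Claim_equal_map_images_to_areas := by
  intro xs _
  unfold Spec_map_images_to_areas map_images_to_areas map_images_to_areas_alt
  have hk := pvKeys_fold xs
  have hnd : (xs.foldl pvStepA pvInitA).keys.Nodup := by rw [hk]; decide
  rw [PySem.Dict.items_eq_map_keys _ hnd [], hk]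
  simp only [List.map_inj_left]
  intro a ha
  rw [pvGetD_fold xs a ha]
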